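-- pv_equiv track=rewrite | github.com/svgbogdnn/algorithms-data-structures-IDAS_course- | [CONTEST] 3 'ИСАД АиСД-1 2526. ДЗ 2. Хеш-функции'/6.py | eqrot
-- ===== SOURCE A (Python) =====
-- def eqrot(a, b, t):
--     n = len(a)
--     if n != len(b):
--         return False
--     j = 0
--     while j < n:
--         ai = (t + j) % n
--         if a[ai] != b[j]:
--             return False
--         j = j + 1
--     return True
-- ===== SOURCE B (Python) =====
-- def eqrot(a, b, t):
--     n = len(a)
--     if n != len(b):
--         return False
--     if n == 0:
--         return True
--     k = t % n
--     return b == a[k:] + a[:k]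
-- ===== Notes on version B (the rewrite author's own statement) =====
-- stated objective: idiomatic
-- what changed: Replaces the per-index while loop with modular arithmetic by materialising the rotation via slicing (a[k:] + a[:k], k = t % n) and one equality comparison, with an explicit n == 0 guard.
import Mathlib
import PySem

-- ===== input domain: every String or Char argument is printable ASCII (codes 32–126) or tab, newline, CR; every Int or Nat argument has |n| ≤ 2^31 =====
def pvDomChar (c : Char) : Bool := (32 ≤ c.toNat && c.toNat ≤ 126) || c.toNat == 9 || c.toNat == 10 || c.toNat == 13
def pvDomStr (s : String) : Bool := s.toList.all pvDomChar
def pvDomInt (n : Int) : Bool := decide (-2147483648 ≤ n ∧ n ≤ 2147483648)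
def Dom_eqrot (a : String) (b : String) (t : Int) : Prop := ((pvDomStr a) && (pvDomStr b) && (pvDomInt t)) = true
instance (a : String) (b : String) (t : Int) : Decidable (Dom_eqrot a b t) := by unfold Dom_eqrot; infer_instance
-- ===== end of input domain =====

-- B replaces A's per-index modular-arithmetic loop with one slice-built rotation and a single equality test (idiomatic; same O(n) cost).

-- ===== PORT A =====
-- the while loop of A: j runs from 0 to n, comparing a[(t+j) % n] with b[j]
def eqrotLoop (la lb : List Char) (t : Int) (n j : Nat) : Bool :=
  if j < n then
    if PySem.List.pyGetD la (PySem.Int.mod (t + (j : Int)) (n : Int)) ' ' ≠ lb.getD j ' ' then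
      false
    else
      eqrotLoop la lb t n (j + 1)
  else
    true
termination_by n - j

def eqrot (a : String) (b : String) (t : Int) : Bool :=
  let la := a.toList
  let lb := b.toList
  let n := la.length
  if n ≠ lb.length then false
  else eqrotLoop la lb t n 0

-- ===== PORT B =====
def eqrot_alt (a : String) (b : String) (t : Int) : Bool :=
  let la := a.toList
  let lb := b.toList
  let n := la.length
  if n ≠ lb.length then false
  else if n = 0 then true
  else
    let k := PySem.Int.mod t (n : Int)
    decide (lb = PySem.List.slice la (some k) none ++ PySem.List.slice la none (some k))

-- ===== PRECONDITION & SPEC =====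
def Spec_eqrot (a : String) (b : String) (t : Int) (out : Bool) : Prop := out = eqrot_alt a b t
instance (a : String) (b : String) (t : Int) (out : Bool) : Decidable (Spec_eqrot a b t out) := by unfold Spec_eqrot; infer_instance

-- ===== CLAIM (what is proved, stated in full; the proofs are below) =====
def Claim_equal_eqrot : Prop := ∀ (a : String) (b : String) (t : Int), Dom_eqrot a b t → Spec_eqrot a b t (eqrot a b t)

-- ===== LEMMAS AND PROOFS =====

-- A's loop returns true iff every remaining position matches
lemma eqrotLoop_true_iff (la lb : List Char) (t : Int) (n j : Nat) :
    eqrotLoop la lb t n j = true ↔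
      ∀ i : Nat, j ≤ i → i < n →
        PySem.List.pyGetD la (PySem.Int.mod (t + (i : Int)) (n : Int)) ' ' = lb.getD i ' ' := by
  unfold eqrotLoop
  split
  · next h =>
    split
    · next hne =>
      simp only [Bool.false_eq_true, false_iff]
      intro hall
      exact hne (hall j le_rfl h)
    · next heq =>
      rw [eqrotLoop_true_iff la lb t n (j + 1)]
      constructor
      · intro hall i hji hin
        rcases Nat.eq_or_lt_of_le hji with rfl | hlt
        · exact not_not.mp heq
        · exact hall i hlt hin
      · intro hall i hji hin
        exact hall i (Nat.le_of_succ_le hji) hin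
  · next h =>
    simp only [true_iff]
    intro i hji hin
    omega
termination_by n - j

-- the Python index (t + i) % n equals the Nat index (k + i) % n where k = (t % n).toNat
lemma mod_shift (t : Int) (n i : Nat) (hn : 0 < n) :
    PySem.Int.mod (t + (i : Int)) (n : Int) = ((((t % (n : Int)).toNat + i) % n : Nat) : Int) := by
  have hn' : (0 : Int) < (n : Int) := by exact_mod_cast hn
  rw [PySem.Int.mod_eq_emod_of_pos hn']
  have hk : ((t % (n : Int)).toNat : Int) = t % (n : Int) :=
    Int.toNat_of_nonneg (Int.emod_nonneg t (by omega))
  have hmm : ∀ x : Int, x % (n : Int) % (n : Int) = x % (n : Int) := fun x =>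
    Int.emod_emod_of_dvd x dvd_rfl
  have h1 : (t + (i : Int)) % (n : Int) = (t % (n : Int) + (i : Int)) % (n : Int) := by
    conv_lhs => rw [Int.add_emod]
    conv_rhs => rw [Int.add_emod, hmm]
  rw [h1, Int.natCast_mod]
  push_cast
  rw [hk]

-- element i of the rotation la.drop k ++ la.take k is la[(k+i) % n]
lemma rot_getD (la : List Char) (k i : Nat) (hk : k < la.length) (hi : i < la.length) :
    (la.drop k ++ la.take k).getD i ' ' = la.getD ((k + i) % la.length) ' ' := by
  have hdl : (la.drop k).length = la.length - k := List.length_drop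
  have htl : (la.take k).length = k := by simp [List.length_take]; omega
  by_cases hcase : i < la.length - k
  · have hmod : (k + i) % la.length = k + i := Nat.mod_eq_of_lt (by omega)
    rw [hmod]
    rw [List.getD_eq_getElem _ _ (by simp [hdl, htl]; omega),
        List.getD_eq_getElem _ _ (by omega)]
    rw [List.getElem_append_left (by omega)]
    simp [List.getElem_drop]
  · have hmod : (k + i) % la.length = k + i - la.length := by
      rw [Nat.mod_eq_sub_mod (by omega), Nat.mod_eq_of_lt (by omega)]
    rw [hmod]
    rw [List.getD_eq_getElem _ _ (by simp [hdl, htl]; omega),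
        List.getD_eq_getElem _ _ (by omega)]
    rw [List.getElem_append_right (by omega)]
    simp [List.getElem_take, hdl]
    congr 1
    omega

-- pointwise characterisation of "lb is la rotated by k"
lemma rot_iff (la lb : List Char) (k : Nat) (hk : k < la.length) (hlen : la.length = lb.length) :
    (lb = la.drop k ++ la.take k) ↔
      ∀ i : Nat, i < la.length → la.getD ((k + i) % la.length) ' ' = lb.getD i ' ' := by
  constructor
  · intro h i hi
    rw [h, rot_getD la k i hk hi]
  · intro h
    have hrl : (la.drop k ++ la.take k).length = la.length := by
      simp; omega
    apply List.ext_getElem (by omega)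
    intro i h1 h2
    have := h i (by omega)
    rw [← rot_getD la k i hk (by omega)] at this
    rw [List.getD_eq_getElem _ _ (by omega), List.getD_eq_getElem _ _ (by omega)] at this
    exact this.symm

theorem eqrot_core (la lb : List Char) (t : Int) (hlen : la.length = lb.length)
    (hn : 0 < la.length) :
    eqrotLoop la lb t la.length 0 =
      decide (lb = PySem.List.slice la (some (PySem.Int.mod t (la.length : Int))) none ++
                   PySem.List.slice la none (some (PySem.Int.mod t (la.length : Int)))) := by
  have hn' : (0 : Int) < (la.length : Int) := by exact_mod_cast hn
  have hmodA : PySem.Int.mod t (la.length : Int) = t % (la.length : Int) :=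
    PySem.Int.mod_eq_emod_of_pos hn'
  set k : Nat := (t % (la.length : Int)).toNat with hkdef
  have hknn : (0 : Int) ≤ t % (la.length : Int) := Int.emod_nonneg t (by omega)
  have hkc : ((k : Nat) : Int) = t % (la.length : Int) := Int.toNat_of_nonneg hknn
  have hklt : k < la.length := by
    have := Int.emod_lt_of_pos t hn'
    omega
  have hslice1 : PySem.List.slice la (some (PySem.Int.mod t (la.length : Int))) none = la.drop k := by
    rw [hmodA, PySem.List.slice_from _ hknn]
  have hslice2 : PySem.List.slice la none (some (PySem.Int.mod t (la.length : Int))) = la.take k := by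
    rw [hmodA, PySem.List.slice_to _ hknn]
  rw [hslice1, hslice2, Bool.eq_iff_iff, eqrotLoop_true_iff, decide_eq_true_iff,
      rot_iff la lb k hklt hlen]
  constructor
  · intro h i hi
    have := h i (Nat.zero_le i) hi
    rw [mod_shift t la.length i hn, PySem.List.pyGetD_natCast] at this
    exact this
  · intro h i _ hi
    rw [mod_shift t la.length i hn, PySem.List.pyGetD_natCast]
    exact h i hi

-- ===== VERDICT (by name: the statement is the Claim_ definition above) =====
theorem eqrot_spec : Claim_equal_eqrot := by
  intro a b t _
  show eqrot a b t = eqrot_alt a b t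
  unfold eqrot eqrot_alt
  by_cases hlen : a.toList.length ≠ b.toList.length
  · rw [if_pos hlen, if_pos hlen]
  · rw [if_neg hlen, if_neg hlen]
    by_cases hz : a.toList.length = 0
    · rw [if_pos hz]
      unfold eqrotLoop
      rw [hz, if_neg (by omega)]
    · rw [if_neg hz]
      exact eqrot_core a.toList b.toList t (by omega) (by omega)
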